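-- pv_equiv track=rewrite | github.com/wsollers/Learning-Real-Analysis | theorem-explorer/extract_lra_chapter.py | strip_comments_keep_length
-- ===== SOURCE A (Python) =====
-- def strip_comments_keep_length(text: str) -> str:
--     out: list[str] = []
--     i = 0
--     n = len(text)
--     while i < n:
--         ch = text[i]
--         if ch == "%":
--             backslashes = 0
--             j = i - 1
--             while j >= 0 and text[j] == "\\":
--                 backslashes += 1
--                 j -= 1
--             if backslashes % 2 == 0:
--                 while i < n and text[i] != "\n":
--                     out.append(" ")
--                     i += 1
--                 continue
--         out.append(ch)
--         i += 1
--     return "".join(out)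
-- ===== SOURCE B (Python) =====
-- def strip_comments_keep_length(text: str) -> str:
--     out: list[str] = []
--     bs = 0            # length of the run of consecutive backslashes just before the current char
--     in_comment = False
--     for ch in text:
--         if ch == "\n":
--             in_comment = False
--             bs = 0
--             out.append("\n")
--         elif in_comment:
--             out.append(" ")
--         elif ch == "%" and bs % 2 == 0:
--             in_comment = True
--             out.append(" ")
--         else:
--             out.append(ch)
--             bs = bs + 1 if ch == "\\" else 0
--     return "".join(out)
-- ===== Notes on version B (the rewrite author's own statement) =====
-- stated objective: faster
-- what changed: Replaces the index-based while loop with a backward scan counting backslashes before every '%' (quadratic on backslash runs) by a single forward pass that maintains the running consecutive-backslash count and an in-comment flag.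
import Mathlib
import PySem

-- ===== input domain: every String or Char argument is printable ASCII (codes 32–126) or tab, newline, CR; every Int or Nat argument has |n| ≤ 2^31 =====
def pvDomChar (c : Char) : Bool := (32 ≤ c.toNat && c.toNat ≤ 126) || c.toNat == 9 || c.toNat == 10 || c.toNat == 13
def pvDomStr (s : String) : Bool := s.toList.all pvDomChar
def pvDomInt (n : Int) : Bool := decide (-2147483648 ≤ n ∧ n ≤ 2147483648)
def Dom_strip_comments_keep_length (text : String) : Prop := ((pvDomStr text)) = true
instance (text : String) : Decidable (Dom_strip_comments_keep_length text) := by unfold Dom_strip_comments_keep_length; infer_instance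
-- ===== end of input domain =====

-- B blanks LaTeX comments in one forward pass (running backslash count + in-comment flag)
-- instead of A's backward backslash scan at every '%'; return values proved equal on all inputs.

-- ===== PORT A =====

-- inner backward scan: `while j >= 0 and text[j] == "\\": backslashes += 1; j -= 1`
def pvCountBS (cs : List Char) (j : Int) : Nat :=
  if h : 0 ≤ j ∧ PySem.List.pyGet? cs j = some '\\' then
    pvCountBS cs (j - 1) + 1
  else 0
termination_by (j + 1).toNat
decreasing_by omega

-- inner blank loop: `while i < n and text[i] != "\n": out.append(" "); i += 1`; returns (i, out)
def pvBlank (cs : List Char) (n i : Nat) (out : List Char) : Nat × List Char :=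
  if i < n ∧ cs.getD i ' ' ≠ '\n' then pvBlank cs n (i + 1) (out ++ [' '])
  else (i, out)
termination_by n - i
decreasing_by omega

theorem pvBlank_fst_ge (cs : List Char) (n i : Nat) (out : List Char) :
    i ≤ (pvBlank cs n i out).1 := by
  fun_induction pvBlank with
  | case1 h ih => omega
  | case2 => simp

theorem pvBlank_fst_gt (cs : List Char) (n i : Nat) (out : List Char)
    (h1 : i < n) (h2 : cs.getD i ' ' ≠ '\n') : i < (pvBlank cs n i out).1 := by
  rw [pvBlank]
  simp only [h1, h2, and_self, if_true, ne_eq, not_false_eq_true]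
  have := pvBlank_fst_ge cs n (i + 1) (out ++ [' '])
  omega

-- outer while loop of A; text[i] read as cs.getD i ' ' (always i < n = cs.length there, so exact)
def pvLoopA (cs : List Char) (n i : Nat) (out : List Char) : List Char :=
  if h : i < n then
    let ch := cs.getD i ' '
    if hc : ch = '%' ∧ pvCountBS cs ((i : Int) - 1) % 2 = 0 then
      pvLoopA cs n (pvBlank cs n i out).1 (pvBlank cs n i out).2
    else
      pvLoopA cs n (i + 1) (out ++ [ch])
  else out
termination_by n - i
decreasing_by
  · have hch : cs.getD i ' ' = '%' := hc.1
    have := pvBlank_fst_gt cs n i out h (by rw [hch]; decide)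
    omega
  · omega

def strip_comments_keep_length (text : String) : String :=
  String.mk (pvLoopA text.toList text.toList.length 0 [])

-- ===== PORT B =====

-- one fold step of B's for-loop; state = (bs, in_comment, out)
def pvStepB (st : Nat × Bool × List Char) (ch : Char) : Nat × Bool × List Char :=
  if ch = '\n' then (0, false, st.2.2 ++ ['\n'])
  else if st.2.1 then (st.1, true, st.2.2 ++ [' '])
  else if ch = '%' ∧ st.1 % 2 = 0 then (0, true, st.2.2 ++ [' '])
  else ((if ch = '\\' then st.1 + 1 else 0), false, st.2.2 ++ [ch])

def strip_comments_keep_length_alt (text : String) : String :=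
  String.mk (text.toList.foldl pvStepB (0, false, [])).2.2

-- ===== PRECONDITION & SPEC =====
def Spec_strip_comments_keep_length (text : String) (out : String) : Prop := out = strip_comments_keep_length_alt text
instance (text : String) (out : String) : Decidable (Spec_strip_comments_keep_length text out) := by unfold Spec_strip_comments_keep_length; infer_instance

-- ===== CLAIM (what is proved, stated in full; the proofs are below) =====
def Claim_equal_strip_comments_keep_length : Prop := ∀ (text : String), Dom_strip_comments_keep_length text → Spec_strip_comments_keep_length text (strip_comments_keep_length text)

-- ===== LEMMAS AND PROOFS =====

-- reference function both ports are reduced to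
mutual
def refF : List Char → Nat → List Char
  | [], _ => []
  | c :: rest, bs =>
    if c = '%' ∧ bs % 2 = 0 then ' ' :: refBlank rest
    else c :: refF rest (if c = '\\' then bs + 1 else 0)
def refBlank : List Char → List Char
  | [] => []
  | c :: rest => if c = '\n' then '\n' :: refF rest 0 else ' ' :: refBlank rest
end

theorem refB_eq (cs : List Char) :
    (∀ bs out, (cs.foldl pvStepB (bs, false, out)).2.2 = out ++ refF cs bs) ∧
    (∀ bs out, (cs.foldl pvStepB (bs, true, out)).2.2 = out ++ refBlank cs) := by
  induction cs with
  | nil => simp [refF, refBlank]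
  | cons c rest ih =>
    constructor
    · intro bs out
      by_cases hn : c = '\n'
      · subst hn
        simp [List.foldl_cons, pvStepB, refF, ih.1]
      · by_cases hc : c = '%' ∧ bs % 2 = 0
        · simp [List.foldl_cons, pvStepB, hc, refF, ih.2]
        · simp only [List.foldl_cons, pvStepB, hn, if_false, Bool.false_eq_true, hc, refF]
          rw [ih.1]
          simp
    · intro bs out
      by_cases hn : c = '\n'
      · subst hn
        simp [List.foldl_cons, pvStepB, refBlank, ih.1]
      · simp [List.foldl_cons, pvStepB, hn, refBlank, ih.2]

theorem refBlank_decomp (l : List Char) (bs : Nat) :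
    refBlank l = List.replicate (l.takeWhile (· ≠ '\n')).length ' '
      ++ refF (l.dropWhile (· ≠ '\n')) bs := by
  induction l with
  | nil => simp [refBlank, refF]
  | cons c rest ih =>
    by_cases hn : c = '\n'
    · subst hn
      simp [refBlank, refF]
    · simp [refBlank, hn, List.replicate_succ, ih]

theorem takeWhile_length_le (l : List Char) (p : Char → Bool) :
    (l.takeWhile p).length ≤ l.length := by
  induction l with
  | nil => simp
  | cons c r ih => by_cases h : p c <;> simp [h] <;> try omega

theorem dropWhile_eq_drop_takeWhile (l : List Char) (p : Char → Bool) :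
    l.dropWhile p = l.drop (l.takeWhile p).length := by
  induction l with
  | nil => simp
  | cons c r ih => by_cases h : p c <;> simp [h, ih]

theorem pvCountBS_step (cs : List Char) (i : Nat) (h : i < cs.length) :
    pvCountBS cs ((i : Int) + 1 - 1)
      = if cs.getD i ' ' = '\\' then pvCountBS cs ((i : Int) - 1) + 1 else 0 := by
  have hg : PySem.List.pyGet? cs (i : Int) = some cs[i] := by
    simp [h]
  rw [show (i : Int) + 1 - 1 = (i : Int) by ring, pvCountBS]
  rw [List.getD_eq_getElem cs ' ' h]
  by_cases hb : cs[i] = '\\'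
  · simp [hg, hb]
  · simp [hg, hb]

theorem pvBlank_eq (cs : List Char) (m i : Nat) (out : List Char) (hm : cs.length - i ≤ m) :
    pvBlank cs cs.length i out
      = (i + ((cs.drop i).takeWhile (· ≠ '\n')).length,
         out ++ List.replicate ((cs.drop i).takeWhile (· ≠ '\n')).length ' ') := by
  induction m generalizing i out with
  | zero =>
    have : cs.drop i = [] := List.drop_eq_nil_of_le (by omega)
    rw [pvBlank, if_neg (by omega), this]
    simp
  | succ m ih =>
    rw [pvBlank]
    by_cases hcond : i < cs.length ∧ cs.getD i ' ' ≠ '\n'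
    · rw [if_pos hcond]
      have hi : i < cs.length := hcond.1
      have hdrop : cs.drop i = cs.getD i ' ' :: cs.drop (i + 1) := by
        rw [List.getD_eq_getElem cs ' ' hi, List.drop_eq_getElem_cons hi]
      rw [ih (i + 1) (out ++ [' ']) (by omega), hdrop,
        List.takeWhile_cons_of_pos (by simpa using hcond.2)]
      simp only [List.length_cons, List.replicate_succ, Prod.mk.injEq]
      exact ⟨by omega, by simp⟩
    · rw [if_neg hcond]
      rcases not_and_or.mp hcond with h1 | h2
      · have : cs.drop i = [] := List.drop_eq_nil_of_le (by omega)
        simp [this]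
      · have hnl : cs.getD i ' ' = '\n' := by
          by_contra hc; exact h2 hc
        by_cases hi : i < cs.length
        · have hdrop : cs.drop i = cs.getD i ' ' :: cs.drop (i + 1) := by
            rw [List.getD_eq_getElem cs ' ' hi, List.drop_eq_getElem_cons hi]
          rw [hdrop, List.takeWhile_cons_of_neg (by simpa using hnl)]
          simp
        · have : cs.drop i = [] := List.drop_eq_nil_of_le (by omega)
          simp [this]

theorem pvLoopA_eq_refF (cs : List Char) (m i : Nat) (out : List Char)
    (hm : cs.length - i ≤ m) :
    pvLoopA cs cs.length i out = out ++ refF (cs.drop i) (pvCountBS cs ((i : Int) - 1)) := by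
  induction m generalizing i out with
  | zero =>
    have hge : cs.length ≤ i := by omega
    rw [pvLoopA, dif_neg (by omega), List.drop_eq_nil_of_le hge]
    simp [refF]
  | succ m ih =>
    by_cases h : i < cs.length
    · have hdrop : cs.drop i = cs.getD i ' ' :: cs.drop (i + 1) := by
        rw [List.getD_eq_getElem cs ' ' h, List.drop_eq_getElem_cons h]
      rw [pvLoopA, dif_pos h]
      by_cases hc : cs.getD i ' ' = '%' ∧ pvCountBS cs ((i : Int) - 1) % 2 = 0
      · rw [dif_pos hc, pvBlank_eq cs (cs.length - i) i out (by omega)]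
        set l := cs.drop (i + 1) with hl
        have hk : (cs.drop i).takeWhile (· ≠ '\n') = cs.getD i ' ' :: l.takeWhile (· ≠ '\n') := by
          rw [hdrop, List.takeWhile_cons_of_pos (by rw [hc.1]; decide)]
        have hd : (cs.drop i).dropWhile (· ≠ '\n') = l.dropWhile (· ≠ '\n') := by
          rw [hdrop, List.dropWhile_cons_of_pos (by rw [hc.1]; decide)]
        set k := ((cs.drop i).takeWhile (· ≠ '\n')).length with hkk
        have hk1 : 1 ≤ k := by rw [hkk, hk]; simp
        have hkle : k ≤ cs.length - i := by
          have h1 := takeWhile_length_le (cs.drop i) (· ≠ '\n')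
          simp only [List.length_drop] at h1
          omega
        rw [ih (i + k) (out ++ List.replicate k ' ') (by omega)]
        have hdropk : cs.drop (i + k) = (cs.drop i).dropWhile (· ≠ '\n') := by
          rw [dropWhile_eq_drop_takeWhile, List.drop_drop, ← hkk, Nat.add_comm]
        rw [hdropk, hd, hdrop, refF, if_pos hc,
          refBlank_decomp l (pvCountBS cs ((i : Int) + (k : Int) - 1))]
        have hkval : k = (l.takeWhile (· ≠ '\n')).length + 1 := by
          rw [hkk, hk]; simp
        rw [show ((i + k : Nat) : Int) = (i : Int) + (k : Int) by push_cast; ring,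
          hkval, List.replicate_succ]
        simp
      · rw [dif_neg hc]
        rw [ih (i + 1) (out ++ [cs.getD i ' ']) (by omega)]
        rw [hdrop, refF, if_neg hc]
        have hstep := pvCountBS_step cs i h
        rw [show ((i + 1 : Nat) : Int) = (i : Int) + 1 by push_cast; ring, hstep]
        simp
    · rw [pvLoopA, dif_neg (by omega), List.drop_eq_nil_of_le (by omega)]
      simp [refF]

theorem pvCountBS_neg_one (cs : List Char) : pvCountBS cs (-1) = 0 := by
  rw [pvCountBS]; simp

-- ===== VERDICT (by name: the statement is the Claim_ definition above) =====
theorem strip_comments_keep_length_spec : Claim_equal_strip_comments_keep_length := by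
  intro text _
  unfold Spec_strip_comments_keep_length strip_comments_keep_length strip_comments_keep_length_alt
  rw [pvLoopA_eq_refF text.toList text.toList.length 0 [] (by omega)]
  rw [show ((0 : Nat) : Int) - 1 = -1 by ring, pvCountBS_neg_one]
  rw [(refB_eq text.toList).1 0 []]
  simp
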